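-- pv_equiv track=rewrite | github.com/Daddy2054/deciphering | Task1.py | different_numbers
-- ===== SOURCE A (Python) =====
-- def different_numbers(texts, calls):
--     different_numbers = set()
--     for text in texts:
--         different_numbers.add(text[0])
--         different_numbers.add(text[1])
--     for call in calls:
--         different_numbers.add(call[0])
--         different_numbers.add(call[1])
--     return len(different_numbers)
-- ===== SOURCE B (Python) =====
-- def different_numbers(texts, calls):
--     nums = []
--     for text in texts:
--         nums.append(text[0])
--         nums.append(text[1])
--     for call in calls:
--         nums.append(call[0])
--         nums.append(call[1])
--     nums.sort()
--     if not nums: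
--         return 0
--     count = 1
--     for i in range(1, len(nums)):
--         if nums[i] != nums[i - 1]:
--             count += 1
--     return count
-- ===== Notes on version B (the rewrite author's own statement) =====
-- stated objective: alternative
-- what changed: Replaces the hash-set membership inserts with gathering all four fields into one list, sorting it, and counting distinct values in a single adjacent-difference scan.
import Mathlib
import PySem

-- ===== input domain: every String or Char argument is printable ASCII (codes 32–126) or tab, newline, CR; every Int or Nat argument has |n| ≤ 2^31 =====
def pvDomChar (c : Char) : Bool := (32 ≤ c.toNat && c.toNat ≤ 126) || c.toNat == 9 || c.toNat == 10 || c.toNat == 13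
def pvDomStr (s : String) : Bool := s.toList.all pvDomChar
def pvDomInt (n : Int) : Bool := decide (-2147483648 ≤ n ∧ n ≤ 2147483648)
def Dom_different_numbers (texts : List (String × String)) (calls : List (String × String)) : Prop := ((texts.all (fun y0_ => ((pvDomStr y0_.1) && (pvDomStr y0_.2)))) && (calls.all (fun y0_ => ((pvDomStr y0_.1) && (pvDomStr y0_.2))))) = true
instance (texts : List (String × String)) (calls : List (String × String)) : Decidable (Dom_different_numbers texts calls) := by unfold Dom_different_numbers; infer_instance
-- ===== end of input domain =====

-- B replaces A's set-insert counting with a gather-sort-adjacent-scan pass (alternative decomposition, not faster).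

-- ===== PORT A =====
def different_numbers (texts : List (String × String)) (calls : List (String × String)) : Int :=
  let s : PySem.Set String := PySem.Set.empty
  let s := texts.foldl (fun s t => PySem.Set.add (PySem.Set.add s t.1) t.2) s
  let s := calls.foldl (fun s c => PySem.Set.add (PySem.Set.add s c.1) c.2) s
  PySem.Set.len s

-- ===== PORT B =====
-- the 'for i in range(1, len(nums))' scan of Source B, carrying the previous element and the count
def dnScan (prev : String) (rest : List String) (count : Int) : Int :=
  match rest with
  | [] => count
  | y :: ys => dnScan y ys (if y ≠ prev then count + 1 else count)

def different_numbers_alt (texts : List (String × String)) (calls : List (String × String)) : Int :=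
  let nums : List String := []
  let nums := texts.foldl (fun acc t => acc ++ [t.1] ++ [t.2]) nums
  let nums := calls.foldl (fun acc c => acc ++ [c.1] ++ [c.2]) nums
  let nums := PySem.List.sorted nums (fun x => x) false
  match nums with
  | [] => 0
  | x :: rest => dnScan x rest 1

-- ===== PRECONDITION & SPEC =====
def Spec_different_numbers (texts : List (String × String)) (calls : List (String × String)) (out : Int) : Prop := out = different_numbers_alt texts calls
instance (texts : List (String × String)) (calls : List (String × String)) (out : Int) : Decidable (Spec_different_numbers texts calls out) := by unfold Spec_different_numbers; infer_instance

-- ===== CLAIM (what is proved, stated in full; the proofs are below) =====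
def Claim_equal_different_numbers : Prop := ∀ (texts : List (String × String)) (calls : List (String × String)), Dom_different_numbers texts calls → Spec_different_numbers texts calls (different_numbers texts calls)

-- ===== LEMMAS AND PROOFS =====

-- number of adjacent changes in a list, seen from a previous element
def dnChg (prev : String) : List String → Int
  | [] => 0
  | y :: ys => (if y ≠ prev then 1 else 0) + dnChg y ys

theorem dnScan_eq_add_chg (l : List String) : ∀ (prev : String) (c : Int),
    dnScan prev l c = c + dnChg prev l := by
  induction l with
  | nil => intro prev c; simp [dnScan, dnChg]
  | cons y ys ih =>
    intro prev c
    simp only [dnScan, dnChg, ih]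
    split_ifs <;> ring

theorem foldlA_eq_foldl_add (ts : List (String × String)) :
    ∀ (s : List String), ts.foldl (fun s t => PySem.Set.add (PySem.Set.add s t.1) t.2) s
      = (ts.flatMap (fun t => [t.1, t.2])).foldl PySem.Set.add s := by
  induction ts with
  | nil => intro s; rfl
  | cons t ts ih => intro s; simp [List.foldl, List.flatMap_cons, ih]

theorem foldlB_eq_append (ts : List (String × String)) :
    ∀ (acc : List String), ts.foldl (fun acc t => acc ++ [t.1] ++ [t.2]) acc
      = acc ++ ts.flatMap (fun t => [t.1, t.2]) := by
  induction ts with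
  | nil => intro acc; simp
  | cons t ts ih => intro acc; simp [List.foldl, List.flatMap]

theorem ofList_length_eq_card (xs : List String) :
    (PySem.Set.ofList xs).length = xs.toFinset.card := by
  have hnd : (PySem.Set.ofList xs).Nodup := PySem.Set.nodup_ofList xs
  have hfs : (PySem.Set.ofList xs).toFinset = xs.toFinset := by
    ext a; simp [List.mem_toFinset, PySem.Set.mem_ofList]
  calc (PySem.Set.ofList xs).length = (PySem.Set.ofList xs).toFinset.card :=
        (List.toFinset_card_of_nodup hnd).symm
    _ = xs.toFinset.card := by rw [hfs]

theorem chg_sorted (r : List String) : ∀ (x : String),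
    (x :: r).Pairwise (· ≤ ·) → 1 + dnChg x r = ((x :: r).toFinset.card : Int) := by
  induction r with
  | nil => intro x _; simp [dnChg]
  | cons y rs ih =>
    intro x hp
    have hxy : x ≤ y := (List.pairwise_cons.mp hp).1 y (by simp)
    have hptail : (y :: rs).Pairwise (· ≤ ·) := (List.pairwise_cons.mp hp).2
    by_cases hxe : y = x
    · subst hxe
      have hih := ih y hptail
      simpa [dnChg] using hih
    · have hxlt : x < y := lt_of_le_of_ne hxy (fun h => hxe h.symm)
      have hxnot : x ∉ y :: rs := by
        intro hmem
        rcases List.mem_cons.mp hmem with h | h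
        · exact hxe h.symm
        · have hyz : y ≤ x := (List.pairwise_cons.mp hptail).1 x h
          exact absurd (lt_of_lt_of_le hxlt hyz) (lt_irrefl x)
      have hih := ih y hptail
      have hcard : ((x :: y :: rs).toFinset.card : Int) = 1 + ((y :: rs).toFinset.card : Int) := by
        have h1 : (x :: y :: rs).toFinset = insert x (y :: rs).toFinset := by simp
        rw [h1, Finset.card_insert_of_notMem (by simpa using hxnot)]
        push_cast; ring
      rw [hcard, ← hih]
      simp only [dnChg, if_pos hxe]

-- the tail of Source B's code (empty check + scan) as a function of the sorted list
def dnCount (l : List String) : Int :=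
  match l with
  | [] => 0
  | x :: rest => dnScan x rest 1

theorem count_sorted_eq_card (l : List String) (hp : l.Pairwise (· ≤ ·)) :
    dnCount l = (l.toFinset.card : Int) := by
  unfold dnCount
  cases l with
  | nil => simp
  | cons x rest =>
    simp only [dnScan_eq_add_chg]
    exact chg_sorted rest x hp

theorem main_bridge (all : List String) :
    PySem.Set.len (all.foldl PySem.Set.add PySem.Set.empty)
      = (match PySem.List.sorted all (fun x => x) false with
         | [] => (0 : Int)
         | x :: rest => dnScan x rest 1) := by
  show PySem.Set.len (all.foldl PySem.Set.add PySem.Set.empty)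
      = dnCount (PySem.List.sorted all (fun x => x) false)
  have hofl : all.foldl PySem.Set.add PySem.Set.empty = PySem.Set.ofList all := rfl
  have hperm : (PySem.List.sorted all (fun x => x) false).Perm all :=
    PySem.List.sorted_perm all (fun x => x) false
  have hpw : (PySem.List.sorted all (fun x => x) false).Pairwise (· ≤ ·) := by
    have := PySem.List.sorted_pairwise all (fun x => x)
    simpa using this
  have hfs : (PySem.List.sorted all (fun x => x) false).toFinset = all.toFinset := by
    ext a; simp [List.mem_toFinset, hperm.mem_iff]
  rw [hofl, count_sorted_eq_card _ hpw, hfs]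
  simp [PySem.Set.len, ofList_length_eq_card]

-- ===== VERDICT (by name: the statement is the Claim_ definition above) =====
theorem different_numbers_spec : Claim_equal_different_numbers := by
  intro texts calls _
  unfold Spec_different_numbers different_numbers different_numbers_alt
  simp only [foldlA_eq_foldl_add, foldlB_eq_append, List.nil_append]
  rw [← List.foldl_append]
  exact main_bridge _
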